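-- pv_equiv track=rewrite | github.com/m1kra/AlgorytmyKombinatoryczne | cw3/cw3.py | calc_rank
-- ===== SOURCE A (Python) =====
-- def calc_rank(someset, n):
--   """
--   Calculates the rank of a subset `someset` of {1, 2, ..., `n`}
--   in the ordering given by grey sequenccce of characteristic vectors.
--   """
--   assoc_seq = [k + 1 in someset for k in range(n)]
--   bit = False
--   rank = 0
--   for k, x in enumerate(assoc_seq):
--     bit ^= x
--     rank += bit * 2**(n - k - 1)
--   return rank
-- ===== SOURCE B (Python) =====
-- def calc_rank(someset, n):
--     g = 0
--     for k in range(n):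
--         if k + 1 in someset:
--             g += 1 << (n - k - 1)
--     b = g
--     mask = g >> 1
--     while mask:
--         b ^= mask
--         mask >>= 1
--     return b
-- ===== Notes on version B (the rewrite author's own statement) =====
-- stated objective: alternative
-- what changed: B first assembles the Gray-code integer g of the characteristic vector, then converts it to the rank by the classic Gray-to-binary shift cascade (b ^= mask while mask >>= 1), instead of A's single pass that carries a running prefix-xor bit and sums weighted bits.
import Mathlib
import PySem

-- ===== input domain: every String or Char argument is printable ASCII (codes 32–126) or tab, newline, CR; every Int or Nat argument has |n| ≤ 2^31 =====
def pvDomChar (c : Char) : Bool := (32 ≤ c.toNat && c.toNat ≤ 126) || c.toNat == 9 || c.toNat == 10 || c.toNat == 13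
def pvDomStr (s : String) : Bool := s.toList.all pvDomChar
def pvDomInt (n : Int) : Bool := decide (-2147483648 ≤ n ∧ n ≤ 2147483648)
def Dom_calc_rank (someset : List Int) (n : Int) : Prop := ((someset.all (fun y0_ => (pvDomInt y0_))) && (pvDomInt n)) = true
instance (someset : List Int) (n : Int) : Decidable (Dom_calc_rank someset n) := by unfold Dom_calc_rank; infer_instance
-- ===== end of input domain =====

-- B builds the Gray-code integer first and then converts it to its rank with the classic
-- Gray-to-binary shift cascade (alternative decomposition; same asymptotic cost as A).

-- ===== PORT A =====
def calc_rank (someset : List Int) (n : Int) : Int :=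
  -- assoc_seq = [k + 1 in someset for k in range(n)]
  let assoc_seq : List Bool := (PySem.List.pyRange 0 n 1).map (fun k => someset.contains (k + 1))
  -- for k, x in enumerate(assoc_seq): bit ^= x; rank += bit * 2**(n - k - 1)
  -- (the exponent n - k - 1 is ≥ 0 at every reached iteration, so .toNat is exact)
  let res := (PySem.List.enumerate assoc_seq 0).foldl
    (fun (st : Bool × Int) (kx : Int × Bool) =>
      let bit := xor st.1 kx.2
      (bit, st.2 + (if bit then (1 : Int) else 0) * 2 ^ (n - kx.1 - 1).toNat))
    (false, 0)
  res.2

-- ===== PORT B =====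
-- while mask: b ^= mask; mask >>= 1   (b, mask are nonnegative Python ints, so Nat xor/shift is exact)
def grayLoop (b mask : Nat) : Nat :=
  if mask = 0 then b else grayLoop (b ^^^ mask) (mask / 2)
termination_by mask
decreasing_by exact Nat.div_lt_self (Nat.pos_of_ne_zero (by assumption)) (by decide)

def calc_rank_alt (someset : List Int) (n : Int) : Int :=
  -- g = 0; for k in range(n): if k + 1 in someset: g += 1 << (n - k - 1)
  let g : Int := (PySem.List.pyRange 0 n 1).foldl
    (fun g k => if someset.contains (k + 1) then g + 2 ^ (n - k - 1).toNat else g) 0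
  -- b = g; mask = g >> 1; cascade.  g ≥ 0 always, so working on Nat is exact.
  (grayLoop g.toNat (g.toNat / 2) : Int)

-- ===== PRECONDITION & SPEC =====
def Spec_calc_rank (someset : List Int) (n : Int) (out : Int) : Prop := out = calc_rank_alt someset n
instance (someset : List Int) (n : Int) (out : Int) : Decidable (Spec_calc_rank someset n out) := by unfold Spec_calc_rank; infer_instance

-- ===== CLAIM (what is proved, stated in full; the proofs are below) =====
def Claim_equal_calc_rank : Prop := ∀ (someset : List Int) (n : Int), Dom_calc_rank someset n → Spec_calc_rank someset n (calc_rank someset n)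

-- ===== LEMMAS AND PROOFS =====

def bitVal (x : Bool) : Nat := cond x 1 0

-- value of a bit list, most significant bit first
def numOf : List Bool → Nat
  | [] => 0
  | x :: r => bitVal x * 2 ^ r.length + numOf r

-- running xor of a bit list
def parity : Bool → List Bool → Bool
  | b, [] => b
  | b, x :: r => parity (xor b x) r

-- A's loop on the bit level: prefix-xor rank
def rankA : Bool → List Bool → Nat
  | _, [] => 0
  | b, x :: r => bitVal (xor b x) * 2 ^ r.length + rankA (xor b x) r

-- Gray-to-binary conversion: xor of all right shifts
def gcb (m : Nat) : Nat :=
  if m = 0 then 0 else m ^^^ gcb (m / 2)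
termination_by m
decreasing_by exact Nat.div_lt_self (Nat.pos_of_ne_zero (by assumption)) (by decide)

lemma gcb_zero : gcb 0 = 0 := by rw [gcb]; simp

lemma gcb_ne (m : Nat) (h : m ≠ 0) : gcb m = m ^^^ gcb (m / 2) := by
  rw [gcb]; simp [h]

lemma xor_div_two (x y : Nat) : (x ^^^ y) / 2 = x / 2 ^^^ y / 2 := by
  apply Nat.eq_of_testBit_eq
  intro i
  rw [Nat.testBit_div_two, Nat.testBit_xor, Nat.testBit_xor, Nat.testBit_div_two, Nat.testBit_div_two]

lemma xor_bits (a c u v : Nat) (hu : u < 2) (hv : v < 2) :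
    (2 * a + u) ^^^ (2 * c + v) = 2 * (a ^^^ c) + (u ^^^ v) := by
  apply Nat.eq_of_testBit_eq
  intro i
  cases i with
  | zero =>
    rw [Nat.testBit_xor]
    simp only [Nat.testBit_zero]
    have h1 : (2 * a + u) % 2 = u := by omega
    have h2 : (2 * c + v) % 2 = v := by omega
    have h3 : (2 * (a ^^^ c) + (u ^^^ v)) % 2 = (u ^^^ v) % 2 := by omega
    rw [h1, h2, h3]
    interval_cases u <;> interval_cases v <;> decide
  | succ i =>
    rw [Nat.testBit_succ, Nat.testBit_succ, xor_div_two]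
    have h1 : (2 * a + u) / 2 = a := by omega
    have h2 : (2 * c + v) / 2 = c := by omega
    have h4 : (u ^^^ v) < 2 := by interval_cases u <;> interval_cases v <;> decide
    have h3 : (2 * (a ^^^ c) + (u ^^^ v)) / 2 = (a ^^^ c) := by omega
    rw [h1, h2, h3]

lemma gcb_div_two (m : Nat) : gcb m / 2 = gcb (m / 2) := by
  induction m using Nat.strong_induction_on with
  | _ m ih =>
    by_cases h : m = 0
    · simp [h, gcb]
    · rw [gcb_ne m h, xor_div_two]
      by_cases h2 : m / 2 = 0
      · rw [h2, gcb_zero]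
        simp
      · rw [ih (m / 2) (Nat.div_lt_self (Nat.pos_of_ne_zero h) (by decide)),
           ← gcb_ne (m / 2) h2]

lemma gcb_bit (m u : Nat) (hu : u < 2) :
    gcb (2 * m + u) = 2 * gcb m + (u ^^^ gcb m % 2) := by
  by_cases h : 2 * m + u = 0
  · have hm : m = 0 := by omega
    have hu0 : u = 0 := by omega
    subst hm; subst hu0; simp [gcb]
  · rw [gcb_ne _ h]
    have hdiv : (2 * m + u) / 2 = m := by omega
    rw [hdiv]
    have hdecomp : gcb m = 2 * (gcb m / 2) + gcb m % 2 := by omega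
    calc (2 * m + u) ^^^ gcb m
        = (2 * m + u) ^^^ (2 * (gcb m / 2) + gcb m % 2) := by rw [← hdecomp]
      _ = 2 * (m ^^^ gcb m / 2) + (u ^^^ gcb m % 2) := xor_bits _ _ _ _ hu (by omega)
      _ = 2 * gcb m + (u ^^^ gcb m % 2) := by
          rw [gcb_div_two]
          by_cases h2 : m = 0
          · subst h2
            simp [gcb_zero]
          · rw [← gcb_ne m h2]

lemma grayLoop_eq (b m : Nat) : grayLoop b m = b ^^^ gcb m := by
  induction m using Nat.strong_induction_on generalizing b with
  | _ m ih =>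
    by_cases h : m = 0
    · simp [h, grayLoop, gcb]
    · rw [grayLoop]; simp only [h, if_false]
      rw [ih (m / 2) (Nat.div_lt_self (Nat.pos_of_ne_zero h) (by decide)),
          gcb_ne m h, Nat.xor_assoc]

lemma grayLoop_gcb (g : Nat) : grayLoop g (g / 2) = gcb g := by
  by_cases h : g = 0
  · simp [h, grayLoop, gcb]
  · rw [grayLoop_eq, ← gcb_ne g h]

lemma numOf_append (L : List Bool) (x : Bool) :
    numOf (L ++ [x]) = 2 * numOf L + bitVal x := by
  induction L with
  | nil => simp [numOf, bitVal]
  | cons y r ih =>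
    simp only [List.cons_append, numOf, List.length_append, List.length_cons, List.length_nil, ih]
    ring_nf

lemma parity_append (b : Bool) (L : List Bool) (x : Bool) :
    parity b (L ++ [x]) = xor (parity b L) x := by
  induction L generalizing b with
  | nil => rfl
  | cons y r ih => simp only [List.cons_append, parity, ih]

lemma rankA_append (b : Bool) (L : List Bool) (x : Bool) :
    rankA b (L ++ [x]) = 2 * rankA b L + bitVal (xor (parity b L) x) := by
  induction L generalizing b with
  | nil => simp [rankA, parity]
  | cons y r ih =>
    simp only [List.cons_append, rankA, List.length_append, List.length_cons, List.length_nil,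
      ih, parity]
    ring_nf

lemma bitVal_lt (x : Bool) : bitVal x < 2 := by cases x <;> decide

-- the heart of the equivalence: Gray-to-binary of the characteristic number is A's prefix-xor rank
lemma main_list (L : List Bool) :
    gcb (numOf L) = rankA false L ∧ rankA false L % 2 = bitVal (parity false L) := by
  induction L using List.reverseRecOn with
  | nil => simp [numOf, rankA, parity, bitVal, gcb_zero]
  | append_singleton L x ih =>
    obtain ⟨ih1, ih2⟩ := ih
    constructor
    · rw [numOf_append, gcb_bit _ _ (bitVal_lt x), ih1, rankA_append, ih2]
      congr 1
      cases x <;> cases parity false L <;> simp [bitVal]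
    · rw [rankA_append, parity_append]
      have := bitVal_lt (xor (parity false L) x)
      omega

-- A's fold computes rankA of the bit list
lemma bridgeA (n : Int) :
    ∀ (L : List Bool) (i : Int) (b : Bool) (r : Int), i + L.length = n →
      (PySem.List.enumerate L i).foldl
        (fun (st : Bool × Int) (kx : Int × Bool) =>
          let bit := xor st.1 kx.2
          (bit, st.2 + (if bit then (1 : Int) else 0) * 2 ^ (n - kx.1 - 1).toNat))
        (b, r)
      = (parity b L, r + (rankA b L : Int)) := by
  intro L
  induction L with
  | nil => intro i b r h; simp [PySem.List.enumerate_nil, parity, rankA]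
  | cons x rest ih =>
    intro i b r h
    rw [PySem.List.enumerate_cons]
    simp only [List.foldl_cons]
    have hlen : (n - i - 1).toNat = rest.length := by
      simp [List.length_cons] at h; omega
    rw [ih (i + 1) (xor b x) _ (by simp [List.length_cons] at h ⊢; omega)]
    simp only [parity, rankA]
    congr 1
    push_cast [hlen]
    have : (if xor b x then (1 : Int) else 0) = (bitVal (xor b x) : Int) := by
      cases xor b x <;> simp [bitVal]
    rw [this]; ring

-- B's accumulation computes numOf of the bit list
lemma bridgeB (someset : List Int) (n : Int) :
    ∀ (m : Nat) (i : Int), (n - i).toNat = m → ∀ (g : Int),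
      (PySem.List.pyRange i n 1).foldl
        (fun g k => if someset.contains (k + 1) then g + 2 ^ (n - k - 1).toNat else g) g
      = g + (numOf ((PySem.List.pyRange i n 1).map (fun k => someset.contains (k + 1))) : Nat) := by
  intro m
  induction m with
  | zero =>
    intro i h g
    rw [PySem.List.pyRange_one_eq_nil (by omega)]
    simp [numOf]
  | succ m ih =>
    intro i h g
    rw [PySem.List.pyRange_one_cons (by omega)]
    simp only [List.foldl_cons, List.map_cons, numOf]
    rw [ih (i + 1) (by omega)]
    have hlen : ((PySem.List.pyRange (i+1) n 1).map (fun k => someset.contains (k + 1))).length = (n - i - 1).toNat := by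
      simp [PySem.List.length_pyRange_one]
      omega
    by_cases hc : someset.contains (i + 1)
    · simp only [hc, if_pos, bitVal, cond_true]
      push_cast [hlen]
      ring
    · simp only [hc, if_neg, Bool.false_eq_true, not_false_iff, bitVal, cond_false]
      push_cast [hlen]
      ring

-- ===== VERDICT (by name: the statement is the Claim_ definition above) =====
theorem calc_rank_spec : Claim_equal_calc_rank := by
  intro someset n _
  unfold Spec_calc_rank calc_rank calc_rank_alt
  simp only []
  set L : List Bool := (PySem.List.pyRange 0 n 1).map (fun k => someset.contains (k + 1)) with hL
  have hlenL : (L.length : Int) = (n - 0).toNat := by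
    simp [hL, PySem.List.length_pyRange_one]
  by_cases hn : n ≤ 0
  · have hnil : PySem.List.pyRange 0 n 1 = [] := PySem.List.pyRange_one_eq_nil (by omega)
    simp only [hL, hnil, List.map_nil, List.foldl_nil, PySem.List.enumerate_nil]
    show (0 : Int) = ((grayLoop (Int.toNat 0) (Int.toNat 0 / 2) : Nat) : Int)
    rw [grayLoop_eq]
    norm_num [gcb_zero]
  · have h0 : (0 : Int) + L.length = n := by omega
    rw [bridgeA n L 0 false 0 h0]
    rw [bridgeB someset n (n - 0).toNat 0 rfl 0]
    simp only [zero_add]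
    have htn : ((numOf L : Int)).toNat = numOf L := Int.toNat_natCast _
    rw [htn, grayLoop_gcb, (main_list L).1]
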